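-- pv_equiv track=rewrite | github.com/FISAAI03/FISAAI_CODING_TEST | Algorithm/PGS/LEVEL2/괄호 변환/조진원.py | solution
-- ===== SOURCE A (Python) =====
-- def solution(s):
--     n = len(s)
--
--     s = list(s*2)
--     answer = 0
--     for i in range(n) :
--         stack = []
--         part = s[i:i+n]
--         while part :
--             k = part.pop()
--             if len(stack) == 0 :
--                 stack.append(k)
--             elif stack[-1] == ']' and k == '[' :
--                 stack.pop()
--             elif stack[-1] == '}' and k == '{' :
--                 stack.pop()
--             elif stack[-1] == ')' and k == '(' :
--                 stack.pop()
--             else :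
--                 stack.append(k)
--         if len(stack) == 0 :
--             answer += 1
--     return answer
-- ===== SOURCE B (Python) =====
-- def solution(s):
--     n = len(s)
--     d = s + s
--     answer = 0
--     for i in range(n):
--         t = d[i:i+n]
--         m = -1
--         while len(t) != m:
--             m = len(t)
--             t = t.replace('()', '').replace('[]', '').replace('{}', '')
--         answer += len(t) == 0
--     return answer
-- ===== Notes on version B (the rewrite author's own statement) =====
-- stated objective: alternative
-- what changed: The per-rotation validity test is changed from A's explicit stack scan (popping the rotation from the end and cancelling against the stack top) to repeated str.replace deletion of the three adjacent bracket pairs until the string's length stops changing, counting the rotation iff the fixed point is empty.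
import Mathlib
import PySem

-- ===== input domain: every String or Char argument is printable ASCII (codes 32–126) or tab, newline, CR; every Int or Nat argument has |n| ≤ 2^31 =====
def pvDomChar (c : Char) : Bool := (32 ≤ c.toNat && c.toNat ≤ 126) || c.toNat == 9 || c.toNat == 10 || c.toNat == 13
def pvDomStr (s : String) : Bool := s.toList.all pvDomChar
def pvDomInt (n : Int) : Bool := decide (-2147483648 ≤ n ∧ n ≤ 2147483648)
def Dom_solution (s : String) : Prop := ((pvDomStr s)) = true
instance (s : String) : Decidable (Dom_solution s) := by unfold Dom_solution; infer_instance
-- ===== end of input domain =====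

-- B replaces A's per-rotation stack scan by reducing each rotation to a fixed point of
-- matched-pair deletion via str.replace (objective: alternative algorithm, similar cost).

-- ===== PORT A =====
-- A's inner while loop pops `part` from the END; consuming the reversed list front-to-back
-- is that same sequence of pops (exact).  The Python stack appends/pops at the END of the
-- list (top = stack[-1]); here the stack is held top-first (cons/tail), the same values.
def reduceA : List Char → List Char → List Char
  | [], stack => stack
  | k :: rest, stack =>
    match stack with
    | [] => reduceA rest [k]
    | top :: st =>
      if top = ']' && k = '[' then reduceA rest st
      else if top = '}' && k = '{' then reduceA rest st
      else if top = ')' && k = '(' then reduceA rest st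
      else reduceA rest (k :: top :: st)

def solution (s : String) : Int :=
  let n : Int := (s.toList.length : Int)
  let d := s.toList ++ s.toList            -- list(s*2)
  (PySem.List.pyRange 0 n 1).foldl (fun answer i =>
    let part := PySem.List.slice d (some i) (some (i + n))
    let stack := reduceA part.reverse []
    if stack.length = 0 then answer + 1 else answer) 0

-- ===== PORT B =====
-- one round of t.replace('()','').replace('[]','').replace('{}','')  (strings as code-point lists, exact)
def repl3 (t : List Char) : List Char :=
  PySem.Chars.replace (PySem.Chars.replace (PySem.Chars.replace t ['(', ')'] []) ['[', ']'] []) ['{', '}'] []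

-- replace with new = '' never lengthens (needed for termination of the while loop below)
theorem replace_nil_length_le (p : List Char) (hp : p ≠ []) (l : List Char) :
    (PySem.Chars.replace l p []).length ≤ l.length := by
  have hp1 : 1 ≤ p.length := by
    cases p with | nil => exact absurd rfl hp | cons a q => simp
  have go_le : ∀ (fuel : Nat) (l acc : List Char),
      (PySem.Chars.replace.go p [] fuel l acc).length ≤ acc.length + l.length := by
    intro fuel
    induction fuel with
    | zero => intro l acc; simp [PySem.Chars.replace.go]
    | succ fuel ih =>
      intro l acc
      cases l with
      | nil => simp [PySem.Chars.replace.go]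
      | cons c t =>
        rw [PySem.Chars.replace.go]
        split
        · have h := ih (List.drop p.length (c :: t)) acc
          have hd : (List.drop p.length (c :: t)).length = (c :: t).length - p.length := by
            simp
          have hc : (c :: t).length = t.length + 1 := by simp
          simp only [List.reverse_nil, List.nil_append] at h ⊢
          omega
        · have h := ih t (c :: acc)
          simp at h ⊢
          omega
  have hne : p.isEmpty = false := by cases p with | nil => exact absurd rfl hp | cons a q => rfl
  simpa [PySem.Chars.replace, hne] using go_le l.length l []

theorem repl3_length_le (t : List Char) : (repl3 t).length ≤ t.length := by
  unfold repl3
  calc (PySem.Chars.replace (PySem.Chars.replace (PySem.Chars.replace t ['(', ')'] []) ['[', ']'] []) ['{', '}'] []).length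
      ≤ (PySem.Chars.replace (PySem.Chars.replace t ['(', ')'] []) ['[', ']'] []).length :=
        replace_nil_length_le _ (by simp) _
    _ ≤ (PySem.Chars.replace t ['(', ')'] []).length := replace_nil_length_le _ (by simp) _
    _ ≤ t.length := replace_nil_length_le _ (by simp) _

-- the while loop: repeat the triple replace until the length stops changing
def fixRepl (t : List Char) : List Char :=
  if _h : (repl3 t).length = t.length then repl3 t else fixRepl (repl3 t)
termination_by t.length
decreasing_by
  have := repl3_length_le t
  omega

def solution_alt (s : String) : Int :=
  let n : Int := (s.toList.length : Int)
  let d := s.toList ++ s.toList            -- s + s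
  (PySem.List.pyRange 0 n 1).foldl (fun answer i =>
    let t := PySem.List.slice d (some i) (some (i + n))
    let r := fixRepl t
    answer + (if r.length = 0 then 1 else 0)) 0

-- ===== PRECONDITION & SPEC =====
def Spec_solution (s : String) (out : Int) : Prop := out = solution_alt s
instance (s : String) (out : Int) : Decidable (Spec_solution s out) := by unfold Spec_solution; infer_instance

-- ===== CLAIM (what is proved, stated in full; the proofs are below) =====
def Claim_equal_solution : Prop := ∀ (s : String), Dom_solution s → Spec_solution s (solution s)

-- ===== LEMMAS AND PROOFS =====

def matchPair (a b : Char) : Bool :=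
  (a = '(' && b = ')') || (a = '[' && b = ']') || (a = '{' && b = '}')

/-- no adjacent matched pair anywhere -/
def NoAdj : List Char → Prop
  | a :: b :: t => matchPair a b = false ∧ NoAdj (b :: t)
  | _ => True

/-- one deletion of an adjacent matched pair somewhere in the string -/
inductive Step : List Char → List Char → Prop
  | mk (x y : List Char) (a b : Char) (h : matchPair a b = true) : Step (x ++ a :: b :: y) (x ++ y)

theorem Step.length {t u : List Char} (h : Step t u) : u.length + 2 = t.length := by
  cases h with | mk x y a b h => simp; omega

theorem rt_length {t u : List Char} (h : Relation.ReflTransGen Step t u) :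
    u.length ≤ t.length ∧ (u.length = t.length → u = t) := by
  induction h with
  | refl => exact ⟨le_refl _, fun _ => rfl⟩
  | tail h1 h2 ih =>
    have := h2.length
    constructor
    · omega
    · intro h; omega

theorem Step.cons {t u : List Char} (c : Char) (h : Step t u) : Step (c :: t) (c :: u) := by
  cases h with
  | mk x y a b hm => exact Step.mk (c :: x) y a b hm

theorem rt_cons {t u : List Char} (c : Char) (h : Relation.ReflTransGen Step t u) :
    Relation.ReflTransGen Step (c :: t) (c :: u) := by
  induction h with
  | refl => exact Relation.ReflTransGen.refl
  | tail h1 h2 ih => exact ih.tail (h2.cons c)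

theorem reduceA_append (x y : List Char) (st : List Char) :
    reduceA (x ++ y) st = reduceA y (reduceA x st) := by
  induction x generalizing st with
  | nil => rfl
  | cons k rest ih =>
    cases st with
    | nil => simp [reduceA, ih]
    | cons top s' =>
      simp only [List.cons_append, reduceA]
      split_ifs <;> simp [ih]

theorem reduceA_cancel {a b : Char} (h : matchPair a b = true) (r st : List Char) :
    reduceA (b :: a :: r) st = reduceA r st := by
  simp only [matchPair, Bool.or_eq_true, Bool.and_eq_true, decide_eq_true_eq] at h
  rcases h with (⟨ha, hb⟩ | ⟨ha, hb⟩) | ⟨ha, hb⟩ <;> subst ha <;> subst hb <;>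
    cases st <;> simp [reduceA]

theorem reduceA_step_inv {t u : List Char} (h : Step t u) (st : List Char) :
    reduceA t.reverse st = reduceA u.reverse st := by
  cases h with
  | mk x y a b hm =>
    have : (x ++ a :: b :: y).reverse = y.reverse ++ (b :: a :: x.reverse) := by simp
    rw [this, List.reverse_append, reduceA_append, reduceA_append, reduceA_cancel hm]

theorem reduceA_rt_inv {t u : List Char} (h : Relation.ReflTransGen Step t u) (st : List Char) :
    reduceA t.reverse st = reduceA u.reverse st := by
  induction h with
  | refl => rfl
  | tail h1 h2 ih => rw [ih, reduceA_step_inv h2]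

/-- a string with no adjacent matched pair is left unchanged by A's stack scan -/
theorem reduceA_of_noAdj {t : List Char} (h : NoAdj t) : reduceA t.reverse [] = t := by
  induction t with
  | nil => rfl
  | cons c t' ih =>
    have ht' : NoAdj t' := by
      cases t' with
      | nil => trivial
      | cons d t'' => exact h.2
    have hrev : (c :: t').reverse = t'.reverse ++ [c] := by simp
    rw [hrev, reduceA_append, ih ht']
    cases t' with
    | nil => rfl
    | cons top s' =>
      have hm : matchPair c top = false := h.1
      simp only [matchPair, Bool.or_eq_false_iff, Bool.and_eq_false_iff,
        decide_eq_false_iff_not] at hm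
      simp only [reduceA]
      split_ifs with h1 h2 h3
      · simp only [Bool.and_eq_true, decide_eq_true_eq] at h1
        obtain ⟨e1, e2⟩ := h1; subst e1; subst e2; simp_all
      · simp only [Bool.and_eq_true, decide_eq_true_eq] at h2
        obtain ⟨e1, e2⟩ := h2; subst e1; subst e2; simp_all
      · simp only [Bool.and_eq_true, decide_eq_true_eq] at h3
        obtain ⟨e1, e2⟩ := h3; subst e1; subst e2; simp_all
      · rfl

/-- the replace pass: its result is reachable by pair deletions, and it shrinks if the pair occurs -/
theorem replace_spec (a b : Char) (hm : matchPair a b = true) (l : List Char) :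
    Relation.ReflTransGen Step l (PySem.Chars.replace l [a, b] []) ∧
      ([a, b] <:+: l → (PySem.Chars.replace l [a, b] []).length < l.length) := by
  have go_spec : ∀ (fuel : Nat) (l acc : List Char), l.length ≤ fuel →
      ∃ r, PySem.Chars.replace.go [a, b] [] fuel l acc = acc.reverse ++ r ∧
        Relation.ReflTransGen Step l r ∧ ([a, b] <:+: l → r.length < l.length) := by
    intro fuel
    induction fuel with
    | zero =>
      intro l acc hl
      have : l = [] := by cases l with | nil => rfl | cons c t => simp at hl
      subst this
      exact ⟨[], by simp [PySem.Chars.replace.go], Relation.ReflTransGen.refl, by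
        intro h; have := List.infix_nil.mp h; simp_all⟩
    | succ fuel ih =>
      intro l acc hl
      cases l with
      | nil =>
        exact ⟨[], by simp [PySem.Chars.replace.go], Relation.ReflTransGen.refl, by
          intro h; have := List.infix_nil.mp h; simp_all⟩
      | cons c t =>
        rw [PySem.Chars.replace.go]
        split
        · rename_i hpre
          obtain ⟨t', ht'⟩ := List.isPrefixOf_iff_prefix.mp hpre
          simp only [List.cons_append, List.nil_append] at ht'
          injection ht' with h1 h2
          subst h1
          subst h2
          have hlen : t'.length ≤ fuel := by simp at hl; omega
          obtain ⟨r, hgo, hrt, _⟩ := ih t' acc hlen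
          refine ⟨r, ?_, ?_, ?_⟩
          · simpa using hgo
          · exact Relation.ReflTransGen.head (Step.mk [] t' a b hm) hrt
          · intro _
            have := (rt_length hrt).1
            simp; omega
        · rename_i hpre
          have hlen : t.length ≤ fuel := by simp at hl; omega
          obtain ⟨r, hgo, hrt, hsh⟩ := ih t (c :: acc) hlen
          refine ⟨c :: r, ?_, rt_cons c hrt, ?_⟩
          · rw [hgo]; simp
          · intro hinf
            have hit : [a, b] <:+: t := by
              rcases List.infix_cons_iff.mp hinf with hp | hi
              · exact absurd (List.isPrefixOf_iff_prefix.mpr hp) (by simp_all)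
              · exact hi
            have := hsh hit
            simp; omega
  have hne : ([a, b] : List Char).isEmpty = false := rfl
  obtain ⟨r, hgo, hrt, hsh⟩ := go_spec l.length l [] (le_refl _)
  have hrepl : PySem.Chars.replace l [a, b] [] = r := by
    simp [PySem.Chars.replace, hne, hgo]
  rw [hrepl]
  exact ⟨hrt, hsh⟩

theorem replace_eq_of_length (a b : Char) (hm : matchPair a b = true) (l : List Char)
    (h : (PySem.Chars.replace l [a, b] []).length = l.length) :
    PySem.Chars.replace l [a, b] [] = l :=
  (rt_length (replace_spec a b hm l).1).2 h

theorem repl3_rt (t : List Char) : Relation.ReflTransGen Step t (repl3 t) := by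
  unfold repl3
  exact ((replace_spec '(' ')' rfl t).1.trans
    (replace_spec '[' ']' rfl _).1).trans (replace_spec '{' '}' rfl _).1

theorem repl3_eq_of_length (t : List Char) (h : (repl3 t).length = t.length) : repl3 t = t :=
  (rt_length (repl3_rt t)).2 h

/-- a fixed point of the triple replace has no adjacent matched pair -/
theorem noAdj_of_repl3_fix (t : List Char) (h : repl3 t = t) : NoAdj t := by
  by_contra hc
  -- extract an adjacent offending pair
  have hex : ∃ x y a b, t = x ++ a :: b :: y ∧ matchPair a b = true := by
    clear h
    induction t with
    | nil => exact absurd trivial hc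
    | cons c t' ih =>
      cases t' with
      | nil => exact absurd trivial hc
      | cons d t'' =>
        by_cases hm : matchPair c d = true
        · exact ⟨[], t'', c, d, rfl, hm⟩
        · have hc' : ¬ NoAdj (d :: t'') := fun hch =>
            hc ⟨by simpa using hm, hch⟩
          obtain ⟨x, y, a, b, he, hmab⟩ := ih hc'
          exact ⟨c :: x, y, a, b, by simp [he], hmab⟩
  obtain ⟨x, y, a, b, he, hmab⟩ := hex
  have hinf : [a, b] <:+: t := ⟨x, y, by simp [he]⟩
  -- lengths along the three stages are squeezed equal, so each stage is the identity
  have l1 : (PySem.Chars.replace t ['(', ')'] []).length ≤ t.length :=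
    (rt_length (replace_spec '(' ')' rfl t).1).1
  have l2 : (PySem.Chars.replace (PySem.Chars.replace t ['(', ')'] []) ['[', ']'] []).length
      ≤ (PySem.Chars.replace t ['(', ')'] []).length :=
    (rt_length (replace_spec '[' ']' rfl _).1).1
  have l3 : (repl3 t).length
      ≤ (PySem.Chars.replace (PySem.Chars.replace t ['(', ')'] []) ['[', ']'] []).length := by
    unfold repl3
    exact (rt_length (replace_spec '{' '}' rfl _).1).1
  have hlen : (repl3 t).length = t.length := by rw [h]
  have e1 : PySem.Chars.replace t ['(', ')'] [] = t :=
    replace_eq_of_length '(' ')' rfl t (by omega)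
  rw [e1] at l2 l3
  have e2 : PySem.Chars.replace t ['[', ']'] [] = t :=
    replace_eq_of_length '[' ']' rfl t (by omega)
  rw [e2] at l3
  have e3 : repl3 t = PySem.Chars.replace t ['{', '}'] [] := by
    unfold repl3; rw [e1, e2]
  simp only [matchPair, Bool.or_eq_true, Bool.and_eq_true, decide_eq_true_eq] at hmab
  rcases hmab with (⟨ha, hb⟩ | ⟨ha, hb⟩) | ⟨ha, hb⟩ <;> subst ha <;> subst hb
  · have := (replace_spec '(' ')' rfl t).2 hinf
    rw [e1] at this
    exact absurd this (lt_irrefl _)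
  · have := (replace_spec '[' ']' rfl t).2 hinf
    rw [e2] at this
    exact absurd this (lt_irrefl _)
  · have := (replace_spec '{' '}' rfl t).2 hinf
    rw [← e3] at this
    omega

theorem fixRepl_rt (t : List Char) : Relation.ReflTransGen Step t (fixRepl t) := by
  fun_induction fixRepl t with
  | case1 t heq => exact repl3_rt t
  | case2 t heq ih => exact (repl3_rt t).trans ih

theorem fixRepl_fix (t : List Char) : repl3 (fixRepl t) = fixRepl t := by
  fun_induction fixRepl t with
  | case1 t heq =>
    have he : repl3 t = t := repl3_eq_of_length t heq
    rw [he]; exact he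
  | case2 t heq ih => exact ih

/-- the crux: B's fixed-point reduction computes exactly A's final stack -/
theorem fixRepl_eq_reduceA (t : List Char) : fixRepl t = reduceA t.reverse [] := by
  have h4 : reduceA (fixRepl t).reverse [] = fixRepl t :=
    reduceA_of_noAdj (noAdj_of_repl3_fix _ (fixRepl_fix t))
  rw [← h4, reduceA_rt_inv (fixRepl_rt t)]

-- ===== VERDICT (by name: the statement is the Claim_ definition above) =====
theorem solution_spec : Claim_equal_solution := by
  intro s _
  unfold Spec_solution solution solution_alt
  simp only
  congr 1
  funext answer i
  simp only [fixRepl_eq_reduceA]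
  split <;> simp
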